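-- pv_equiv track=rewrite | github.com/Nix-ml-journey/StoryForge-RAG | Generative_AI/penalty_processors.py | pick_best_context_story
-- ===== SOURCE A (Python) =====
-- _ALIGNMENT_STOP = frozenset({
--     "a", "an", "the", "this", "that", "is", "are", "was", "were", "be",
--     "been", "being", "have", "has", "had", "do", "does", "did", "will",
--     "would", "could", "should", "can", "may", "might", "must", "shall",
--     "to", "of", "in", "on", "at", "by", "for", "with", "from", "up",
--     "out", "off", "about", "into", "through", "and", "but", "or", "so",
--     "if", "then", "than", "not", "no", "as", "who", "whom", "what",
--     "which", "where", "when", "how", "why", "their", "they", "them",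
--     "its", "it", "he", "she", "his", "her", "someone", "something",
--     "tries", "try", "finds", "find", "little", "strange",
-- })
--
-- def _extract_query_keywords(query: str) -> set[str]:
--     words = {w.lower().strip(",.;:!?'\"") for w in query.split()}
--     return {w for w in words if w not in _ALIGNMENT_STOP and len(w) >= 3}
--
-- def pick_best_context_story(query: str, context_parts: list[str]) -> list[str]:
--     """Given multiple '[Title by Author]\\n...' blocks, return them sorted by query relevance.
--
--     The most relevant story (highest keyword overlap) comes first. Strips blocks
--     with zero overlap if at least one block has overlap.
--     """
--     if not context_parts or not query:
--         return context_parts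
--
--     query_keywords = _extract_query_keywords(query)
--     if not query_keywords:
--         return context_parts
--
--     scored: list[tuple[float, int, str]] = []
--     for idx, part in enumerate(context_parts):
--         part_lower = part.lower()
--         matched = sum(1 for kw in query_keywords if kw in part_lower)
--         score = matched / len(query_keywords)
--         scored.append((score, idx, part))
--
--     scored.sort(key=lambda t: t[0], reverse=True)
--
--     best_score = scored[0][0]
--     if best_score > 0:
--         filtered = [part for score, _, part in scored if score > 0]
--         return filtered
--
--     return context_parts
-- ===== SOURCE B (Python) =====
-- _ALIGNMENT_STOP = frozenset({
--     "a", "an", "the", "this", "that", "is", "are", "was", "were", "be",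
--     "been", "being", "have", "has", "had", "do", "does", "did", "will",
--     "would", "could", "should", "can", "may", "might", "must", "shall",
--     "to", "of", "in", "on", "at", "by", "for", "with", "from", "up",
--     "out", "off", "about", "into", "through", "and", "but", "or", "so",
--     "if", "then", "than", "not", "no", "as", "who", "whom", "what",
--     "which", "where", "when", "how", "why", "their", "they", "them",
--     "its", "it", "he", "she", "his", "her", "someone", "something",
--     "tries", "try", "finds", "find", "little", "strange",
-- })
--
-- def _extract_query_keywords(query: str) -> set[str]:
--     words = {w.lower().strip(",.;:!?'\"") for w in query.split()}
--     return {w for w in words if w not in _ALIGNMENT_STOP and len(w) >= 3}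
--
-- def pick_best_context_story(query: str, context_parts: list[str]) -> list[str]:
--     """No sort: count matches per block, then emit one filtering pass per
--     match-count level from the maximum down to 1 (original order inside a level)."""
--     if not context_parts or not query:
--         return context_parts
--
--     keywords = _extract_query_keywords(query)
--     if not keywords:
--         return context_parts
--
--     counts = []
--     for part in context_parts:
--         low = part.lower()
--         c = 0
--         for kw in keywords:
--             if kw in low:
--                 c += 1
--         counts.append(c)
--
--     m = max(counts)
--     if m == 0:
--         return context_parts
--
--     result = []
--     for level in range(m, 0, -1):
--         for part, c in zip(context_parts, counts):
--             if c == level: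
--                 result.append(part)
--     return result
-- ===== Notes on version B (the rewrite author's own statement) =====
-- stated objective: alternative
-- what changed: B removes A's build-score-tuples + stable comparison sort + post-filter entirely: it computes each block's integer keyword-match count in an explicit accumulator loop, then emits the output by one filtering pass over the original list per count level, from the maximal count down to 1 (returning the input unchanged when the maximum is 0).
import Mathlib
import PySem

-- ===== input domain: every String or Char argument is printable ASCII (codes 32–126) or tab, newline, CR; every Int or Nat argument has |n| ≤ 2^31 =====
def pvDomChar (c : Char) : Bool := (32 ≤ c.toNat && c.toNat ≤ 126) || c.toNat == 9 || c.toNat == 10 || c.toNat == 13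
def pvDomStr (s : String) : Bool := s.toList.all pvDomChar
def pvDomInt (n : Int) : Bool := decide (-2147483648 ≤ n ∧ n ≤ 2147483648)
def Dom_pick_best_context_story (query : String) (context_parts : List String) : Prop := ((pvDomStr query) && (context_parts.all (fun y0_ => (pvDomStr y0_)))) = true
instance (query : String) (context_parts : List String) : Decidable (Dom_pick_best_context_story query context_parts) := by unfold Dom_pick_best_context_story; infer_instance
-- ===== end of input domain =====

-- B replaces A's tagged-tuple stable sort + post-filter by level passes: one filtering sweep of
-- the original list per match count, from the maximum down to 1 (objective: alternative).

-- ===== PORT A =====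
-- module constant _ALIGNMENT_STOP (a frozenset used only for membership tests)
def pvAlignmentStop : List String :=
  ["a", "an", "the", "this", "that", "is", "are", "was", "were", "be",
   "been", "being", "have", "has", "had", "do", "does", "did", "will",
   "would", "could", "should", "can", "may", "might", "must", "shall",
   "to", "of", "in", "on", "at", "by", "for", "with", "from", "up",
   "out", "off", "about", "into", "through", "and", "but", "or", "so",
   "if", "then", "than", "not", "no", "as", "who", "whom", "what",
   "which", "where", "when", "how", "why", "their", "they", "them",
   "its", "it", "he", "she", "his", "her", "someone", "something",
   "tries", "try", "finds", "find", "little", "strange"]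

-- module helper _extract_query_keywords, shared by both Pythons (A and B call the same function);
-- the returned set is only iterated for an order-independent count and tested for emptiness.
def pvExtractQueryKeywords (query : String) : List String :=
  let words : PySem.Set String := PySem.Set.ofList
    ((PySem.Str.split₀ query).map (fun w => PySem.Str.stripChars (PySem.Str.lower w) ",.;:!?'\""))
  words.filter (fun w => !(pvAlignmentStop.contains w) && decide (3 ≤ PySem.Str.len w))

-- A's matched = sum(1 for kw in query_keywords if kw in part_lower)
def pvMatchCount (query_keywords : List String) (part : String) : Int :=
  let part_lower := PySem.Str.lower part
  (query_keywords.map (fun kw => if PySem.Str.isIn kw part_lower then (1 : Int) else 0)).sum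

-- A's score = matched / len(query_keywords) is a float with the fixed positive denominator
-- len(query_keywords): ordering and the (> 0) tests of score coincide exactly with those of the
-- integer `matched` (the quotients of small ints by one positive int are strictly monotone in
-- IEEE doubles), so the port carries `matched` as the first tuple component instead of the float.
def pick_best_context_story (query : String) (context_parts : List String) : List String :=
  if context_parts = [] || query = "" then context_parts
  else
    let query_keywords := pvExtractQueryKeywords query
    if query_keywords = [] then context_parts
    else
      let scored : List (Int × Int × String) :=
        (PySem.List.enumerate context_parts).foldl
          (fun acc ip => acc ++ [(pvMatchCount query_keywords ip.2, ip.1, ip.2)]) []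
      let scored := PySem.List.sorted scored (fun t => t.1) true
      match scored with
      | [] => context_parts   -- unreachable: context_parts ≠ [] here, Python reads scored[0][0]
      | t :: _ =>
        if 0 < t.1 then (scored.filter (fun s => 0 < s.1)).map (fun s => s.2.2)
        else context_parts

-- ===== PORT B =====
-- B's inner counting loop: c = 0; for kw in keywords: if kw in low: c += 1
def altCount (keywords : List String) (part : String) : Int :=
  let low := PySem.Str.lower part
  keywords.foldl (fun c kw => if PySem.Str.isIn kw low then c + 1 else c) 0

def pick_best_context_story_alt (query : String) (context_parts : List String) : List String :=
  if context_parts.isEmpty || query.isEmpty then context_parts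
  else
    let keywords := pvExtractQueryKeywords query
    if keywords.isEmpty then context_parts
    else
      let counts := context_parts.foldl (fun acc part => acc ++ [altCount keywords part]) []
      match PySem.List.max? counts (fun c => c) with
      | none => context_parts   -- unreachable: counts ≠ [] here, Python reads max(counts)
      | some m =>
        if m = 0 then context_parts
        else
          (PySem.List.pyRange m 0 (-1)).foldl
            (fun result level =>
              (context_parts.zip counts).foldl
                (fun r pc => if pc.2 == level then r ++ [pc.1] else r) result) []

-- ===== PRECONDITION & SPEC =====
def Spec_pick_best_context_story (query : String) (context_parts : List String) (out : List String) : Prop := out = pick_best_context_story_alt query context_parts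
instance (query : String) (context_parts : List String) (out : List String) : Decidable (Spec_pick_best_context_story query context_parts out) := by unfold Spec_pick_best_context_story; infer_instance

-- ===== CLAIM (what is proved, stated in full; the proofs are below) =====
def Claim_equal_pick_best_context_story : Prop := ∀ (query : String) (context_parts : List String), Dom_pick_best_context_story query context_parts → Spec_pick_best_context_story query context_parts (pick_best_context_story query context_parts)

-- ===== LEMMAS AND PROOFS =====

-- B's accumulator loop computes A's 0/1-sum
lemma pvFoldl_ite_add (P : String → Bool) (l : List String) (i : Int) :
    l.foldl (fun c kw => if P kw then c + 1 else c) i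
      = i + (l.map (fun kw => if P kw then (1 : Int) else 0)).sum := by
  induction l generalizing i with
  | nil => simp
  | cons x t ih =>
    simp only [List.foldl_cons, List.map_cons, List.sum_cons, ih]
    by_cases h : P x
    · simp only [if_pos h]
      ring
    · simp [h]

lemma pvAltCount_eq (k : List String) (p : String) : altCount k p = pvMatchCount k p := by
  unfold altCount pvMatchCount
  rw [pvFoldl_ite_add]
  simp

-- the descending run [n, n-1, …, 1] of Ints
def pvDsc : Nat → List Int
  | 0 => []
  | n + 1 => ((n + 1 : Nat) : Int) :: pvDsc n

lemma pvDsc_mem (n : Nat) (c : Int) : c ∈ pvDsc n ↔ 1 ≤ c ∧ c ≤ (n : Int) := by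
  induction n with
  | zero => simp [pvDsc]; omega
  | succ k ih => simp [pvDsc, ih]; omega

lemma pvDsc_pairwise (n : Nat) : (pvDsc n).Pairwise (fun a b => b < a) := by
  induction n with
  | zero => simp [pvDsc]
  | succ k ih =>
    refine List.Pairwise.cons ?_ ih
    intro b hb
    rw [pvDsc_mem] at hb
    omega

lemma pvMapRange_eq_dsc (n : Nat) : (List.range n).map (fun k : Nat => (n : Int) - (k : Int)) = pvDsc n := by
  induction n with
  | zero => simp [pvDsc]
  | succ k ih =>
    rw [List.range_succ_eq_map, List.map_cons, List.map_map]
    have hfun : ((fun j : Nat => ((k + 1 : Nat) : Int) - (j : Int)) ∘ Nat.succ : Nat → Int)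
        = fun j : Nat => (k : Int) - (j : Int) := by
      funext j; simp only [Function.comp_apply, Nat.succ_eq_add_one]; push_cast; ring
    rw [hfun, ih]
    simp [pvDsc]

lemma pvPyRange_eq_dsc (n : Nat) : PySem.List.pyRange (n : Int) 0 (-1) = pvDsc n := by
  simp only [PySem.List.pyRange]
  norm_num
  rcases Nat.eq_zero_or_pos n with h | h
  · simp [h, pvDsc]
  · rw [if_pos h]
    calc List.map (fun k : Nat => (n : Int) + -(k : Int)) (List.range n)
        = List.map (fun k : Nat => (n : Int) - k) (List.range n) := by
          apply List.map_congr_left; intro a _; ring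
      _ = pvDsc n := pvMapRange_eq_dsc n

lemma pvInsertBy_append (before : (Int × Int × String) → (Int × Int × String) → Bool)
    (x : Int × Int × String) (as bs : List (Int × Int × String))
    (h : ∀ y ∈ as, before x y = false) :
    PySem.List.insertBy before x (as ++ bs) = as ++ PySem.List.insertBy before x bs := by
  induction as with
  | nil => simp
  | cons a t ih =>
    have ha : before x a = false := h a (by simp)
    simp only [List.cons_append, PySem.List.insertBy, ha]
    simp [ih (fun y hy => h y (by simp [hy]))]

lemma pvInsertBy_all_before (before : (Int × Int × String) → (Int × Int × String) → Bool)
    (x : Int × Int × String) (bs : List (Int × Int × String))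
    (h : ∀ y ∈ bs, before x y = true) :
    PySem.List.insertBy before x bs = x :: bs := by
  cases bs with
  | nil => simp [PySem.List.insertBy]
  | cons b t => simp [PySem.List.insertBy, h b (by simp)]

-- inserting x into a bucket-shaped list (buckets in strictly descending key order) appends it
-- to the end of its own bucket — the stable-insertion-sort step
lemma pvInsert_groups (key : (Int × Int × String) → Int) (x : Int × Int × String)
    (rs : List Int) (G : Int → List (Int × Int × String))
    (hrs : rs.Pairwise (fun a b => b < a)) (hx : key x ∈ rs)
    (hG : ∀ c ∈ rs, ∀ y ∈ G c, key y = c) :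
    PySem.List.insertBy (fun a b => decide (key b < key a)) x (rs.flatMap G)
      = rs.flatMap (fun c => G c ++ if key x = c then [x] else []) := by
  induction rs with
  | nil => simp at hx
  | cons c rs' ih =>
    rw [List.pairwise_cons] at hrs
    obtain ⟨hlt, hrs'⟩ := hrs
    have hGc : ∀ y ∈ G c, key y = c := hG c (by simp)
    have htail : ∀ y ∈ rs'.flatMap G, key y < c := by
      intro y hy
      rw [List.mem_flatMap] at hy
      obtain ⟨c', hc', hyc⟩ := hy
      have := hG c' (by simp [hc']) y hyc
      have := hlt c' hc'
      omega
    by_cases hxc : key x = c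
    · rw [List.flatMap_cons, List.flatMap_cons]
      rw [pvInsertBy_append _ _ _ _ (by
        intro y hy
        have := hGc y hy
        simp [this, hxc])]
      rw [pvInsertBy_all_before _ _ _ (by
        intro y hy
        have := htail y hy
        simp; omega)]
      rw [if_pos hxc]
      have hcongr : List.flatMap (fun c => G c ++ if key x = c then [x] else []) rs'
          = List.flatMap G rs' := by
        apply List.flatMap_congr
        intro c' hc'
        have hlt' := hlt c' hc'
        rw [if_neg (by omega)]
        simp
      rw [hcongr]
      simp
    · have hx' : key x ∈ rs' := by
        rcases List.mem_cons.mp hx with h | h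
        · exact absurd h hxc
        · exact h
      have hxlt : key x < c := hlt _ hx'
      rw [List.flatMap_cons, List.flatMap_cons]
      rw [pvInsertBy_append _ _ _ _ (by
        intro y hy
        have := hGc y hy
        simp; omega)]
      rw [ih hrs' hx' (fun c' hc' => hG c' (by simp [hc']))]
      rw [if_neg hxc]
      simp

-- Python's stable reverse sort of a list whose keys all lie in the strictly descending rs
-- IS the concatenation of the key buckets in rs order, original order inside each bucket
lemma pvSorted_groups (key : (Int × Int × String) → Int) (rs : List Int)
    (hrs : rs.Pairwise (fun a b => b < a)) (xs : List (Int × Int × String))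
    (hxs : ∀ x ∈ xs, key x ∈ rs) :
    PySem.List.sorted xs key true = rs.flatMap (fun c => xs.filter (fun x => key x == c)) := by
  induction xs using List.reverseRecOn with
  | nil => simp [PySem.List.sorted, List.flatMap]
  | append_singleton ys x ih =>
    have hstep : PySem.List.sorted (ys ++ [x]) key true
        = PySem.List.insertBy (fun a b => decide (key b < key a)) x (PySem.List.sorted ys key true) := by
      rw [PySem.List.sorted_rev_eq_foldl_insertBy, PySem.List.sorted_rev_eq_foldl_insertBy,
        List.foldl_append]
      rfl
    rw [hstep, ih (fun y hy => hxs y (by simp [hy]))]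
    rw [pvInsert_groups key x rs _ hrs (hxs x (by simp)) (by
      intro c hc y hy
      rw [List.mem_filter] at hy
      exact by simpa using hy.2)]
    apply List.flatMap_congr
    intro c hc
    rw [List.filter_append]
    congr 1
    by_cases h : key x = c <;> simp [h]

lemma pvEnum_snd_mem (xs : List String) (s : Int) (ip : Int × String)
    (h : ip ∈ PySem.List.enumerate xs s) : ip.2 ∈ xs := by
  induction xs generalizing s with
  | nil => simp [PySem.List.enumerate_nil] at h
  | cons x t ih =>
    rw [PySem.List.enumerate_cons] at h
    rcases List.mem_cons.mp h with h | h
    · simp [h]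
    · exact List.mem_cons_of_mem _ (ih (s + 1) h)

lemma pvEnum_mem_of_mem (xs : List String) (s : Int) (p : String) (h : p ∈ xs) :
    ∃ i : Int, (i, p) ∈ PySem.List.enumerate xs s := by
  induction xs generalizing s with
  | nil => simp at h
  | cons x t ih =>
    rw [PySem.List.enumerate_cons]
    rcases List.mem_cons.mp h with h | h
    · exact ⟨s, by simp [h]⟩
    · obtain ⟨i, hi⟩ := ih (s + 1) h
      exact ⟨i, by simp [hi]⟩

-- A's bucket c, projected to the parts, is the parts with match count c in original order
lemma pvGroupA (cnt : String → Int) (xs : List String) (s : Int) (c : Int) :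
    (((PySem.List.enumerate xs s).map (fun ip => (cnt ip.2, ip.1, ip.2))).filter
        (fun t => t.1 == c)).map (fun t => t.2.2)
      = xs.filter (fun p => cnt p == c) := by
  induction xs generalizing s with
  | nil => simp [PySem.List.enumerate_nil]
  | cons x t ih =>
    rw [PySem.List.enumerate_cons, List.map_cons, List.filter_cons, List.filter_cons]
    by_cases h : cnt x == c
    · simp only [h]
      simp [ih (s + 1)]
    · simp only [h]
      simp at h
      simp [ih (s + 1)]

-- B's level-c pass over zip(context_parts, counts) yields the same bucket
lemma pvGroupB (cnt : String → Int) (xs : List String) (c : Int) :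
    (((xs.zip (xs.map cnt)).filter (fun q => q.2 == c)).map (fun q => q.1))
      = xs.filter (fun p => cnt p == c) := by
  induction xs with
  | nil => simp
  | cons x t ih =>
    rw [List.map_cons, List.zip_cons_cons, List.filter_cons, List.filter_cons]
    by_cases h : cnt x == c
    · simp only [h]
      simp [ih]
    · simp only [h]
      simp at h
      simp [ih]

lemma pvMatchCount_nonneg (k : List String) (p : String) : 0 ≤ pvMatchCount k p := by
  unfold pvMatchCount
  rw [PySem.List.sum_map_ite_one_zero]
  exact Int.natCast_nonneg _

-- ===== VERDICT (by name: the statement is the Claim_ definition above) =====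
theorem pick_best_context_story_spec : Claim_equal_pick_best_context_story := by
  intro query parts _
  unfold Spec_pick_best_context_story pick_best_context_story pick_best_context_story_alt
  by_cases hp : parts = []
  · simp [hp]
  by_cases hq : query = ""
  · simp [hq]
  have hpe : parts.isEmpty = false := by simpa [List.isEmpty_iff] using hp
  have hqe : query.isEmpty = false := by
    rw [Bool.eq_false_iff]
    intro h
    exact hq (String.isEmpty_iff.mp h)
  simp only [hp, hq, hpe, hqe, decide_false, Bool.or_self, Bool.false_eq_true, if_false]
  by_cases hk : pvExtractQueryKeywords query = []
  · simp [hk]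
  have hke : (pvExtractQueryKeywords query).isEmpty = false := by
    simpa [List.isEmpty_iff] using hk
  rw [if_neg hk, if_neg (by simp [hke])]
  rw [PySem.List.foldl_append_singleton_eq_map
    (fun ip : Int × String => (pvMatchCount (pvExtractQueryKeywords query) ip.2, ip.1, ip.2))]
  rw [List.nil_append]
  set k := pvExtractQueryKeywords query with hkdef
  set cnt := pvMatchCount k with hcntdef
  set f : Int × String → Int × Int × String := fun ip => (cnt ip.2, ip.1, ip.2) with hfdef
  set scored := (PySem.List.enumerate parts 0).map f with hscdef
  have hcounts : parts.foldl (fun acc part => acc ++ [altCount k part]) []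
      = parts.map (fun p => cnt p) := by
    rw [PySem.List.foldl_append_singleton_eq_map (altCount k), List.nil_append]
    exact List.map_congr_left (fun p _ => pvAltCount_eq k p)
  rw [hcounts]
  set counts := parts.map (fun part => cnt part) with hctsdef
  cases hmax : PySem.List.max? counts (fun c => c) with
  | none =>
    have : counts = [] := (PySem.List.max?_eq_none_iff _ _).1 hmax
    exact absurd (by simpa [hctsdef] using this) hp
  | some m =>
  have hm_mem : m ∈ counts := PySem.List.max?_mem hmax
  have hm_max : ∀ y ∈ counts, y ≤ m := by
    intro y hy
    exact PySem.List.max?_isMax hmax y hy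
  have hcnt_nonneg : ∀ y ∈ counts, 0 ≤ y := by
    intro y hy
    rw [hctsdef] at hy
    obtain ⟨p, _, rfl⟩ := List.mem_map.mp hy
    exact pvMatchCount_nonneg k p
  have hm0 : 0 ≤ m := hcnt_nonneg m hm_mem
  cases hsort : PySem.List.sorted scored (fun t => t.1) true with
  | nil =>
    have hsc : scored = [] := (PySem.List.sorted_eq_nil_iff _ _ _).1 hsort
    cases parts with
    | nil => exact absurd rfl hp
    | cons a l => simp [hscdef, PySem.List.enumerate_cons] at hsc
  | cons t rest =>
  have ht_mem : t ∈ scored := (PySem.List.sorted_perm scored (fun t => t.1) true).mem_iff.mp (by rw [hsort]; simp)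
  have ht_le : t.1 ≤ m := by
    obtain ⟨ip, hip, rfl⟩ := List.mem_map.mp ht_mem
    exact hm_max _ (List.mem_map.mpr ⟨ip.2, pvEnum_snd_mem parts 0 ip hip, rfl⟩)
  have hle_t : m ≤ t.1 := by
    obtain ⟨p, hpmem, hpm⟩ := List.mem_map.mp hm_mem
    obtain ⟨i, hi⟩ := pvEnum_mem_of_mem parts 0 p hpmem
    have hfs : f (i, p) ∈ scored := List.mem_map.mpr ⟨(i, p), hi, rfl⟩
    have := PySem.List.key_head_sorted_rev_ge scored (fun t => t.1) hsort _ hfs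
    simpa [hfdef, hpm] using this
  have htm : t.1 = m := le_antisymm ht_le hle_t
  dsimp only
  by_cases hm : m = 0
  · rw [if_pos hm, if_neg (by omega)]
  rw [if_neg hm, if_pos (by omega)]
  set n := m.toNat with hndef
  have hmn : (n : Int) = m := by omega
  set rs0 : List Int := pvDsc n ++ [0] with hrs0def
  have hrs0 : rs0.Pairwise (fun a b => b < a) := by
    rw [hrs0def, List.pairwise_append]
    refine ⟨pvDsc_pairwise n, by simp, ?_⟩
    intro a ha b hb
    simp at hb
    rw [pvDsc_mem] at ha
    omega
  have hmem : ∀ x ∈ scored, (fun t : Int × Int × String => t.1) x ∈ rs0 := by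
    intro x hx
    obtain ⟨ip, hip, rfl⟩ := List.mem_map.mp hx
    have h1 : cnt ip.2 ∈ counts := List.mem_map.mpr ⟨ip.2, pvEnum_snd_mem parts 0 ip hip, rfl⟩
    have h2 := hm_max _ h1
    have h3 := hcnt_nonneg _ h1
    simp only [hrs0def, List.mem_append, pvDsc_mem, hfdef]
    simp at h2 h3 ⊢
    omega
  have hgroups := pvSorted_groups (fun t => t.1) rs0 hrs0 scored hmem
  have hts : t :: rest = rs0.flatMap (fun c => scored.filter (fun x => x.1 == c)) := by
    rw [← hsort, hgroups]
  rw [hts]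
  have hAside : ((rs0.flatMap (fun c => scored.filter (fun x => x.1 == c))).filter
      (fun s => decide (0 < s.1))).map (fun s => s.2.2)
      = (pvDsc n).flatMap (fun c => parts.filter (fun p => cnt p == c)) := by
    rw [List.filter_flatMap]
    rw [hrs0def, List.flatMap_append]
    have hzero : List.flatMap (fun c => (scored.filter (fun x => x.1 == c)).filter
        (fun s => decide (0 < s.1))) [0] = [] := by
      simp only [List.flatMap_cons, List.flatMap_nil, List.append_nil]
      rw [List.filter_eq_nil_iff.mpr]
      intro y hy
      rw [List.mem_filter] at hy
      have : y.1 = 0 := by simpa using hy.2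
      simp [this]
    rw [hzero, List.append_nil]
    rw [List.flatMap_congr (g := fun c => scored.filter (fun x => x.1 == c)) (by
      intro c hc
      rw [pvDsc_mem] at hc
      apply List.filter_eq_self.mpr
      intro y hy
      rw [List.mem_filter] at hy
      have : y.1 = c := by simpa using hy.2
      simp [this]; omega)]
    rw [List.map_flatMap]
    apply List.flatMap_congr
    intro c hc
    rw [hscdef, hfdef, pvGroupA]
  rw [hAside]
  -- B side: each level pass is 'result ++ <bucket>', so the range loop is a flatMap
  have hinner : (fun (result : List String) (level : Int) =>
      (parts.zip counts).foldl (fun r pc => if pc.2 == level then r ++ [pc.1] else r) result)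
      = fun result level => result ++ parts.filter (fun p => cnt p == level) := by
    funext result level
    rw [PySem.List.foldl_append_if (fun pc : String × Int => pc.2 == level) (fun pc => pc.1)]
    rw [hctsdef, pvGroupB]
  rw [hinner]
  rw [PySem.List.foldl_append_eq_flatMap, List.nil_append]
  rw [← hmn, pvPyRange_eq_dsc]
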